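-- pv_equiv track=rewrite | github.com/vinaykumar721/cp_modules | 02-hasnoprimes-Python/hasnoprimes.py | fun_hasnoprimes
-- ===== SOURCE A (Python) =====
-- def fun_hasnoprimes(l):
--     l1=[]
--     for i in l:
--         for j in i:
--             l1.append(j)
--
--     for x in l1:
--         if isPrime(x):
--             return False
--     return True
--
-- def isPrime(n):
--     if n<2:
--         return False
--     elif n==2:
--         return True
--     elif n%2==0:
--         return False
--     else:
--         for i in range(3,n):
--             if n%i==0:
--                 return False
--         return True
-- ===== SOURCE B (Python) =====
-- def fun_hasnoprimes(l):
--     mx = max((x for row in l for x in row), default=1)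
--     if mx < 2:
--         return True
--     r = 1
--     while (r + 1) * (r + 1) <= mx:
--         r += 1
--     composite = [False] * (r + 1)
--     for p in range(2, r + 1):
--         for k in range(2, r // p + 1):
--             composite[p * k] = True
--     primes = [p for p in range(2, r + 1) if not composite[p]]
--     return not any(
--         x >= 2 and all(x % p for p in primes if p * p <= x)
--         for row in l for x in row)
-- ===== Notes on version B (the rewrite author's own statement) =====
-- stated objective: alternative
-- what changed: Instead of trial-dividing every element by all numbers up to it, B computes the maximum, sieves the primes up to isqrt(max) once, and decides each element's primality by dividing only by those sieved primes p with p*p <= x.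
import Mathlib
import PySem

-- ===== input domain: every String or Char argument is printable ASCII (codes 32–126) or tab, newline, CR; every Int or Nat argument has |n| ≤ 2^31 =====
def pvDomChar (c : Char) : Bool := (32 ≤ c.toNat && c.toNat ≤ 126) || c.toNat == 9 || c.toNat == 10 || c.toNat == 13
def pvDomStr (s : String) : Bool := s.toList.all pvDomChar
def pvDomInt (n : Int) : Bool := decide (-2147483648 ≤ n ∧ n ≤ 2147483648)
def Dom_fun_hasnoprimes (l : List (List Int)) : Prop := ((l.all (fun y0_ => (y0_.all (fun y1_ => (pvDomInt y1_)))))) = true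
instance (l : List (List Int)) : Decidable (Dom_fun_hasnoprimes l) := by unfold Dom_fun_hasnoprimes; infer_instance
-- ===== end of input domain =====

-- B replaces A's per-element trial division (range(3,n) scan) by one sieve of the primes up
-- to isqrt(max element) plus a divide-by-those-primes pass (objective: alternative).

-- ===== PORT A =====
-- the 'for i in range(3, n)' loop of isPrime, with its early return False
def pvIsPrimeLoop (n : Int) : List Int → Bool
  | [] => true
  | i :: rest => if PySem.Int.mod n i == 0 then false else pvIsPrimeLoop n rest

def pvIsPrime (n : Int) : Bool :=
  if n < 2 then false
  else if n == 2 then true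
  else if PySem.Int.mod n 2 == 0 then false
  else pvIsPrimeLoop n (PySem.List.pyRange 3 n 1)

-- the 'for x in l1' loop with its early return False
def pvCheckLoop : List Int → Bool
  | [] => true
  | x :: rest => if pvIsPrime x then false else pvCheckLoop rest

def fun_hasnoprimes (l : List (List Int)) : Bool :=
  pvCheckLoop (l.foldl (fun l1 i => i.foldl (fun l1 j => l1 ++ [j]) l1) [])

-- ===== PORT B =====
-- the 'while (r+1)*(r+1) <= mx' loop of Source B
def pvIsqrtLoop (mx r : Nat) : Nat :=
  if (r + 1) * (r + 1) ≤ mx then pvIsqrtLoop mx (r + 1) else r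
  termination_by mx - r
  decreasing_by
    rename_i h
    have h1 : r + 1 ≤ mx := le_trans (by nlinarith) h
    omega

-- the two nested sieve-marking loops of Source B (indices p*k with 2 ≤ p ≤ r, 2 ≤ k ≤ r/p are
-- always in range, so setIfInBounds is exact for Python's list assignment here)
def pvSieve (r : Nat) : Array Bool :=
  (List.range' 2 (r - 1)).foldl
    (fun s p => (List.range' 2 (r / p - 1)).foldl (fun s k => s.setIfInBounds (p * k) true) s)
    (Array.replicate (r + 1) false)

def fun_hasnoprimes_alt (l : List (List Int)) : Bool :=
  let mx := (PySem.List.max? (l.flatMap id) (fun x => x)).getD 1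
  if mx < 2 then true
  else
    let r := pvIsqrtLoop mx.toNat 1
    let composite := pvSieve r
    let primes := (List.range' 2 (r - 1)).filter (fun p => !(composite.getD p false))
    !((l.flatMap id).any (fun x =>
        decide (2 ≤ x) &&
          ((primes.filter (fun p : Nat => decide ((p : Int) * (p : Int) ≤ x))).all
            (fun p => !(PySem.Int.mod x (p : Int) == 0)))))

-- ===== PRECONDITION & SPEC =====
def Spec_fun_hasnoprimes (l : List (List Int)) (out : Bool) : Prop := out = fun_hasnoprimes_alt l
instance (l : List (List Int)) (out : Bool) : Decidable (Spec_fun_hasnoprimes l out) := by unfold Spec_fun_hasnoprimes; infer_instance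

-- ===== CLAIM (what is proved, stated in full; the proofs are below) =====
def Claim_equal_fun_hasnoprimes : Prop := ∀ (l : List (List Int)), Dom_fun_hasnoprimes l → Spec_fun_hasnoprimes l (fun_hasnoprimes l)

-- ===== LEMMAS AND PROOFS =====

-- A's flatten loop is List.flatten
theorem pvFlatten_eq (l : List (List Int)) :
    l.foldl (fun l1 i => i.foldl (fun l1 j => l1 ++ [j]) l1) [] = l.flatMap id := by
  have h2 : ∀ (L : List (List Int)) (acc : List Int),
      L.foldl (fun l1 i => l1 ++ i) acc = acc ++ L.flatten := by
    intro L
    induction L with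
    | nil => intro acc; simp
    | cons i rest ih => intro acc; simp [ih]
  simp only [PySem.List.foldl_append_singleton, h2]
  simp [List.flatMap_id]

-- A's scan loop is an 'all'
theorem pvCheckLoop_eq_all (xs : List Int) :
    pvCheckLoop xs = xs.all (fun x => !pvIsPrime x) := by
  induction xs with
  | nil => rfl
  | cons x rest ih =>
      simp [pvCheckLoop, List.all_cons, ih]

theorem pvIsPrimeLoop_eq (n : Int) (xs : List Int) :
    pvIsPrimeLoop n xs = xs.all (fun i => !(PySem.Int.mod n i == 0)) := by
  induction xs with
  | nil => rfl
  | cons i rest ih =>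
      simp only [pvIsPrimeLoop, List.all_cons, ih]
      split <;> simp_all

-- characterisation of A's trial-division primality test
theorem pvIsPrime_iff (x : Int) :
    pvIsPrime x = true ↔ 2 ≤ x ∧ ¬∃ d : Int, 2 ≤ d ∧ d < x ∧ d ∣ x := by
  unfold pvIsPrime
  rcases lt_or_ge x 2 with h1 | h1
  · rw [if_pos h1]
    constructor
    · intro h; exact absurd h (by simp)
    · intro h; omega
  · have h1' : ¬ x < 2 := by omega
    rcases eq_or_ne x 2 with h2 | h2
    · subst h2
      rw [if_neg h1', if_pos (beq_iff_eq.mpr rfl)]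
      constructor
      · intro _; exact ⟨by omega, fun ⟨d, hd1, hd2, _⟩ => by omega⟩
      · intro _; rfl
    · have hx : 2 < x := by omega
      have h2' : ¬ ((x == 2) = true) := fun hc => h2 (beq_iff_eq.mp hc)
      rw [if_neg h1', if_neg h2']
      by_cases h3 : PySem.Int.mod x 2 = 0
      · have h2dvd : (2:Int) ∣ x := (PySem.Int.mod_eq_zero_iff_dvd x 2).mp h3
        rw [if_pos (beq_iff_eq.mpr h3)]
        constructor
        · intro h; exact absurd h (by simp)
        · intro ⟨_, hno⟩; exact absurd ⟨2, by omega, hx, h2dvd⟩ hno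
      · have h2ndvd : ¬ (2:Int) ∣ x := fun hd =>
          h3 ((PySem.Int.mod_eq_zero_iff_dvd x 2).mpr hd)
        have h3' : ¬ ((PySem.Int.mod x 2 == 0) = true) := fun hc => h3 (beq_iff_eq.mp hc)
        rw [if_neg h3', pvIsPrimeLoop_eq, List.all_eq_true]
        constructor
        · intro hall
          refine ⟨by omega, fun ⟨d, hd1, hd2, hdvd⟩ => ?_⟩
          rcases eq_or_ne d 2 with rfl | hd2'
          · exact h2ndvd hdvd
          · have hmem : d ∈ PySem.List.pyRange 3 x 1 :=
              (PySem.List.mem_pyRange_one).mpr ⟨by omega, hd2⟩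
            have hd0 := hall d hmem
            simp only [Bool.not_eq_eq_eq_not, Bool.not_true, beq_eq_false_iff_ne] at hd0
            exact hd0 ((PySem.Int.mod_eq_zero_iff_dvd x d).mpr hdvd)
        · rintro ⟨_, hno⟩ i hi
          have hmem := (PySem.List.mem_pyRange_one).mp hi
          simp only [Bool.not_eq_eq_eq_not, Bool.not_true, beq_eq_false_iff_ne]
          intro hmod
          exact hno ⟨i, by omega, hmem.2, (PySem.Int.mod_eq_zero_iff_dvd x i).mp hmod⟩

-- a fold of 'set true' updates, read back at q
theorem foldl_set_getD (idxs : List Nat) (s : Array Bool) (q : Nat) (hq : q < s.size)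
    (hidx : ∀ i ∈ idxs, i < s.size) :
    (idxs.foldl (fun s i => s.setIfInBounds i true) s).getD q false
      = (s.getD q false || idxs.contains q) := by
  induction idxs generalizing s with
  | nil => simp
  | cons i rest ih =>
      have hi : i < s.size := hidx i (by simp)
      have hq' : q < (s.setIfInBounds i true).size := by simpa using hq
      rw [List.foldl_cons, ih (s.setIfInBounds i true) hq'
        (fun j hj => by simpa using hidx j (by simp [hj]))]
      have : (s.setIfInBounds i true).getD q false = (s.getD q false || (i == q)) := by
        rw [← Array.getElem_eq_getD (xs := s.setIfInBounds i true) (h := hq') false,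
          ← Array.getElem_eq_getD (xs := s) (h := hq) false,
          Array.getElem_setIfInBounds hq]
        rcases eq_or_ne i q with rfl | hne
        · simp
        · simp [hne]
      rw [this]
      rcases eq_or_ne i q with rfl | hne
      · simp
      · rw [(by simp [hne] : (i == q) = false)]
        simp [Ne.symm hne]

theorem foldl_set_size (idxs : List Nat) (s : Array Bool) :
    (idxs.foldl (fun s i => s.setIfInBounds i true) s).size = s.size := by
  induction idxs generalizing s with
  | nil => rfl
  | cons i rest ih => rw [List.foldl_cons, ih]; simp

-- the outer marking loop, as a boolean membership test
theorem foldl_mark_getD (m : Nat) (ps : List Nat) (s : Array Bool) (q : Nat)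
    (hq : q < s.size) (hm : m < s.size) :
    ((ps.foldl (fun s p => (List.range' 2 (m / p - 1)).foldl
        (fun s k => s.setIfInBounds (p * k) true) s) s).getD q false)
      = (s.getD q false ||
          ps.any (fun p => (List.range' 2 (m / p - 1)).any (fun k => p * k == q))) := by
  induction ps generalizing s with
  | nil => simp
  | cons p rest ih =>
      rw [List.foldl_cons]
      have hmap : (List.range' 2 (m / p - 1)).foldl (fun s k => s.setIfInBounds (p * k) true) s
          = ((List.range' 2 (m / p - 1)).map (fun k => p * k)).foldl
              (fun s i => s.setIfInBounds i true) s := by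
        rw [List.foldl_map]
      have hbnd : ∀ i ∈ (List.range' 2 (m / p - 1)).map (fun k => p * k), i < s.size := by
        intro i hi
        rcases List.mem_map.mp hi with ⟨k, hk, rfl⟩
        have hk' := List.mem_range'_1.mp hk
        have hkd : k ≤ m / p := by omega
        have : p * k ≤ m :=
          le_trans (Nat.mul_le_mul_left p hkd) (by rw [Nat.mul_comm]; exact Nat.div_mul_le_self m p)
        omega
      have hsz := foldl_set_size ((List.range' 2 (m / p - 1)).map (fun k => p * k)) s
      rw [hmap, ih _ (by rw [hsz]; omega) (by rw [hsz]; omega),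
        foldl_set_getD _ s q hq hbnd]
      rw [Bool.eq_iff_iff]
      simp only [Bool.or_eq_true, List.mem_map, List.any_cons,
        List.any_eq_true, beq_iff_eq, Array.getD_eq_getD_getElem?, List.contains_iff_mem]
      constructor
      · rintro ((h | h) | h)
        · exact Or.inl h
        · exact Or.inr (Or.inl h)
        · exact Or.inr (Or.inr h)
      · rintro (h | h | h)
        · exact Or.inl (Or.inl h)
        · exact Or.inl (Or.inr h)
        · exact Or.inr h

-- sieve read-back characterisation
theorem pvSieve_getD (m q : Nat) (hq : q ≤ m) :
    (pvSieve m).getD q false = true ↔ ∃ p k : Nat, 2 ≤ p ∧ 2 ≤ k ∧ p * k = q := by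
  unfold pvSieve
  rw [foldl_mark_getD m _ _ q (by simp; omega) (by simp)]
  have hrep : (Array.replicate (m + 1) false).getD q false = false := by
    rw [← Array.getElem_eq_getD (h := by simp; omega) false]
    simp
  rw [hrep]
  simp only [Bool.false_or, List.any_eq_true, List.mem_range'_1, beq_iff_eq]
  constructor
  · rintro ⟨p, ⟨hp2, _⟩, k, ⟨hk2, _⟩, rfl⟩
    exact ⟨p, k, hp2, hk2, rfl⟩
  · rintro ⟨p, k, hp2, hk2, rfl⟩
    have hpq : p ≤ p * k := Nat.le_mul_of_pos_right p (by omega)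
    have hkd : k ≤ m / p := (Nat.le_div_iff_mul_le (by omega)).mpr (by rw [Nat.mul_comm]; exact hq)
    have hd1 : 1 ≤ m / p := by omega
    exact ⟨p, ⟨hp2, by omega⟩, k, ⟨hk2, by omega⟩, rfl⟩

-- ===== VERDICT (by name: the statement is the Claim_ definition above) =====
theorem pvAll_congr (l : List Int) (f g : Int → Bool) (h : ∀ x ∈ l, f x = g x) :
    l.all f = l.all g := by
  induction l with
  | nil => rfl
  | cons x rest ih =>
      rw [List.all_cons, List.all_cons, h x (by simp), ih (fun y hy => h y (by simp [hy]))]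

-- divisor-in-range ↔ nontrivial Nat factorisation, for 2 ≤ x
theorem pvFactor_iff (x : Int) (hx : 2 ≤ x) :
    (∃ d : Int, 2 ≤ d ∧ d < x ∧ d ∣ x) ↔
      ∃ p k : Nat, 2 ≤ p ∧ 2 ≤ k ∧ p * k = x.toNat := by
  constructor
  · rintro ⟨d, hd2, hdx, e, rfl⟩
    have he2 : 2 ≤ e := by nlinarith
    refine ⟨d.toNat, e.toNat, by omega, by omega, ?_⟩
    have hd0 : 0 ≤ d := by omega
    have he0 : 0 ≤ e := by omega
    have : ((d.toNat * e.toNat : Nat) : Int) = ((d * e).toNat : Int) := by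
      push_cast
      rw [Int.toNat_of_nonneg hd0, Int.toNat_of_nonneg he0,
        Int.toNat_of_nonneg (by positivity)]
    exact_mod_cast this
  · rintro ⟨p, k, hp2, hk2, hpk⟩
    refine ⟨(p : Int), by exact_mod_cast hp2, ?_, ⟨(k : Int), ?_⟩⟩
    · have h1 : p * 1 < p * k := by
        nlinarith
      have h2 : p < x.toNat := by omega
      omega
    · have : ((p * k : Nat) : Int) = x := by
        rw [hpk]; exact Int.toNat_of_nonneg (by omega)
      push_cast at this
      omega

theorem pvIsqrtLoop_spec (mx r : Nat) (h : r * r ≤ mx) :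
    pvIsqrtLoop mx r * pvIsqrtLoop mx r ≤ mx ∧
      mx < (pvIsqrtLoop mx r + 1) * (pvIsqrtLoop mx r + 1) := by
  induction r using pvIsqrtLoop.induct mx with
  | case1 r hc ih =>
      rw [pvIsqrtLoop, if_pos hc]
      exact ih (le_trans (by nlinarith) hc)
  | case2 r hc =>
      rw [pvIsqrtLoop, if_neg hc]
      exact ⟨h, by omega⟩

theorem pvNatFactor_divisor (n : Nat) :
    (∃ a b, 2 ≤ a ∧ 2 ≤ b ∧ a * b = n) ↔ ∃ m, 2 ≤ m ∧ m < n ∧ m ∣ n := by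
  constructor
  · rintro ⟨a, b, ha, hb, rfl⟩
    exact ⟨a, ha, by nlinarith, Dvd.intro b (by ring)⟩
  · rintro ⟨m, hm2, hmn, e, rfl⟩
    have he : 2 ≤ e := by
      rcases Nat.lt_or_ge e 2 with hc | hc
      · interval_cases e <;> omega
      · exact hc
    exact ⟨m, e, hm2, he, rfl⟩

theorem pvPrime_iff_nofac (q : Nat) (h2 : 2 ≤ q) :
    q.Prime ↔ ¬∃ a b, 2 ≤ a ∧ 2 ≤ b ∧ a * b = q := by
  rw [Nat.prime_def_lt', pvNatFactor_divisor]
  constructor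
  · rintro ⟨_, hnd⟩ ⟨m, hm2, hmn, hdvd⟩
    exact hnd m hm2 hmn hdvd
  · intro h
    exact ⟨h2, fun m hm2 hmn hdvd => h ⟨m, hm2, hmn, hdvd⟩⟩

theorem pvNatFactor_iff_prime_div (n : Nat) (hn : 2 ≤ n) :
    (∃ a b, 2 ≤ a ∧ 2 ≤ b ∧ a * b = n) ↔ ∃ p, p.Prime ∧ p * p ≤ n ∧ p ∣ n := by
  constructor
  · intro hfac
    have hnp : ¬n.Prime := fun hp => ((pvPrime_iff_nofac n hn).mp hp) hfac
    have hp := Nat.minFac_prime (by omega : n ≠ 1)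
    have hd := Nat.minFac_dvd n
    have hsq : n.minFac * n.minFac ≤ n := by
      have := Nat.minFac_sq_le_self (by omega) hnp
      nlinarith [this]
    exact ⟨n.minFac, hp, hsq, hd⟩
  · rintro ⟨p, hp, hsq, e, rfl⟩
    have hp2 := hp.two_le
    have he : p ≤ e := by nlinarith
    exact ⟨p, e, hp2, by omega, rfl⟩

theorem pvSieve_prime (r q : Nat) (h2 : 2 ≤ q) (hq : q ≤ r) :
    ((pvSieve r).getD q false = false) ↔ q.Prime := by
  have hb : (pvSieve r).getD q false = false ↔ ¬((pvSieve r).getD q false = true) := by simp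
  rw [hb, pvSieve_getD r q hq, pvPrime_iff_nofac q h2]

theorem pvPrimes_mem (r p : Nat) :
    p ∈ (List.range' 2 (r - 1)).filter (fun p => !(pvSieve r).getD p false) ↔
      p.Prime ∧ p ≤ r := by
  rw [List.mem_filter, List.mem_range'_1]
  constructor
  · rintro ⟨⟨hp2, hpr⟩, hbv⟩
    have hpr' : p ≤ r := by omega
    exact ⟨(pvSieve_prime r p hp2 hpr').mp (by simpa using hbv), hpr'⟩
  · rintro ⟨hp, hpr⟩
    have hp2 := hp.two_le
    exact ⟨⟨hp2, by omega⟩, by simpa using (pvSieve_prime r p hp2 hpr).mpr hp⟩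

theorem pvNotAny (l : List Int) (f : Int → Bool) :
    (!(l.any f)) = l.all (fun x => !f x) := by
  induction l with
  | nil => rfl
  | cons a t ih => simp [List.any_cons, List.all_cons, ← ih, Bool.not_or]

-- ===== VERDICT (by name: the statement is the Claim_ definition above) =====
theorem fun_hasnoprimes_spec : Claim_equal_fun_hasnoprimes := by
  intro l _
  unfold Spec_fun_hasnoprimes fun_hasnoprimes fun_hasnoprimes_alt
  rw [pvFlatten_eq, pvCheckLoop_eq_all]
  have hmax : ∀ x ∈ l.flatMap id, x ≤ (PySem.List.max? (l.flatMap id) (fun x => x)).getD 1 := by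
    intro x hx
    rcases ho : PySem.List.max? (l.flatMap id) (fun x => x) with _ | mm
    · have : l.flatMap id = [] :=
        (PySem.List.max?_eq_none_iff (l.flatMap id) (fun x => x)).mp ho
      rw [this] at hx; cases hx
    · have := PySem.List.max?_isMax ho x hx
      simpa [ho] using this
  set flat := l.flatMap id with hflat
  set m := (PySem.List.max? flat (fun x => x)).getD 1 with hm
  by_cases hm2 : m < 2
  · rw [if_pos hm2, List.all_eq_true]
    intro x hx
    have hx2 : x < 2 := lt_of_le_of_lt (hmax x hx) hm2
    unfold pvIsPrime
    rw [if_pos hx2]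
    rfl
  · rw [if_neg hm2]
    obtain ⟨hrle, hrlt⟩ := pvIsqrtLoop_spec m.toNat 1 (by omega)
    set r := pvIsqrtLoop m.toNat 1 with hr
    rw [pvNotAny]
    apply pvAll_congr
    intro x hx
    congr 1
    rcases lt_or_ge x 2 with hx2 | hx2
    · have h1 : pvIsPrime x = false := by unfold pvIsPrime; rw [if_pos hx2]
      rw [h1, decide_eq_false (by omega : ¬ (2:Int) ≤ x), Bool.false_and]
    · rw [decide_eq_true hx2, Bool.true_and]
      have hxm : x ≤ m := hmax x hx
      have hxt2 : 2 ≤ x.toNat := by omega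
      have hxtm : x.toNat ≤ m.toNat := by omega
      have hxx : ((x.toNat : Int)) = x := Int.toNat_of_nonneg (by omega)
      have hcastd : ∀ p : Nat, ((p : Int) ∣ x ↔ p ∣ x.toNat) := by
        intro p
        have h := Int.natCast_dvd_natCast (m := p) (n := x.toNat)
        rw [hxx] at h
        exact h
      have hcastle : ∀ p : Nat, ((p : Int) * (p : Int) ≤ x ↔ p * p ≤ x.toNat) := by
        intro p
        have h := Nat.cast_le (α := Int) (m := p * p) (n := x.toNat)
        rw [hxx] at h
        push_cast at h
        exact h
      have hRHS :
          (((List.range' 2 (r - 1)).filter (fun p => !(pvSieve r).getD p false)).filter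
              (fun p : Nat => decide ((p : Int) * (p : Int) ≤ x))).all
              (fun p : Nat => !(PySem.Int.mod x (p : Int) == 0)) = true
            ↔ ¬∃ p, p.Prime ∧ p * p ≤ x.toNat ∧ p ∣ x.toNat := by
        rw [List.all_eq_true]
        constructor
        · rintro hall ⟨p, hp, hpp, hpd⟩
          have hple : p ≤ r := by nlinarith
          have hmem : p ∈ (((List.range' 2 (r - 1)).filter
              (fun p => !(pvSieve r).getD p false)).filter
              (fun p : Nat => decide ((p : Int) * (p : Int) ≤ x))) :=
            List.mem_filter.mpr ⟨(pvPrimes_mem r p).mpr ⟨hp, hple⟩,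
              decide_eq_true ((hcastle p).mpr hpp)⟩
          have hv := hall p hmem
          simp only [Bool.not_eq_eq_eq_not, Bool.not_true, beq_eq_false_iff_ne] at hv
          exact hv ((PySem.Int.mod_eq_zero_iff_dvd x (p : Int)).mpr ((hcastd p).mpr hpd))
        · intro hno p hmem
          obtain ⟨hmemP, hle⟩ := List.mem_filter.mp hmem
          obtain ⟨hp, _⟩ := (pvPrimes_mem r p).mp hmemP
          simp only [Bool.not_eq_eq_eq_not, Bool.not_true, beq_eq_false_iff_ne]
          intro hmod
          exact hno ⟨p, hp, (hcastle p).mp (of_decide_eq_true hle),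
            (hcastd p).mp ((PySem.Int.mod_eq_zero_iff_dvd x (p : Int)).mp hmod)⟩
      rw [Bool.eq_iff_iff, hRHS, pvIsPrime_iff, pvFactor_iff x hx2,
        ← pvNatFactor_iff_prime_div x.toNat hxt2]
      constructor
      · rintro ⟨_, h⟩; exact h
      · intro h; exact ⟨hx2, h⟩
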